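-- pv_equiv track=rewrite | github.com/Ximaxis/algo_and_structures_python | Lesson_2/8.py | search
-- ===== SOURCE A (Python) =====
-- def search(n, f, i = 0):
--     if n < 1:
--         return i
--     else:
--         if n % 10 == f:
--             i += 1
--         else:
--             pass
--     return search((n // 10), f, i)
-- ===== SOURCE B (Python) =====
-- def search(n, f, i=0):
--     digits = []
--     while n >= 1:
--         digits.append(n % 10)
--         n //= 10
--     return i + digits.count(f)
-- ===== Notes on version B (the rewrite author's own statement) =====
-- stated objective: idiomatic
-- what changed: Replaces accumulator-threading recursion with a two-phase iterative version: a while loop collects the digits into a list, then list.count(f) counts the matches.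
import Mathlib
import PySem

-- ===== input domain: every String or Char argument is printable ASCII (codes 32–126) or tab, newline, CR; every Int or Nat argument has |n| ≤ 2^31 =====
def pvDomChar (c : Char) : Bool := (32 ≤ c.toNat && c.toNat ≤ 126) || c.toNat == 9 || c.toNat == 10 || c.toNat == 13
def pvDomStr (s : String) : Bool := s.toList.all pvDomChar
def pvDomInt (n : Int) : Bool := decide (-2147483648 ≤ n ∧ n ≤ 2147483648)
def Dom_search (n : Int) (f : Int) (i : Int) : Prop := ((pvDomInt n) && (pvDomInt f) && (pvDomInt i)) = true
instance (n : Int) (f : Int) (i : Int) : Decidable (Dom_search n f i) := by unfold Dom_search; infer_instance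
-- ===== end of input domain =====

-- B replaces A's accumulator-threading recursion with an iterative loop that collects the digit list and then counts f in it (idiomatic decomposition; same cost).

-- ===== PORT A =====
def search (n : Int) (f : Int) (i : Int) : Int :=
  if n < 1 then i
  else
    let i' := if PySem.Int.mod n 10 = f then i + 1 else i
    search (PySem.Int.floordiv n 10) f i'
termination_by n.toNat
decreasing_by
  have h10 : (0:Int) < 10 := by norm_num
  rw [PySem.Int.floordiv_eq_ediv_of_pos h10]
  omega

-- ===== PORT B =====
-- B helper: the list of decimal digits collected by the while loop (low digit first)
def pyDigits (n : Int) : List Int :=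
  if n ≥ 1 then
    PySem.Int.mod n 10 :: pyDigits (PySem.Int.floordiv n 10)
  else []
termination_by n.toNat
decreasing_by
  have h10 : (0:Int) < 10 := by norm_num
  rw [PySem.Int.floordiv_eq_ediv_of_pos h10]
  omega

def search_alt (n : Int) (f : Int) (i : Int) : Int :=
  i + ((pyDigits n).count f : Int)

-- ===== PRECONDITION & SPEC =====
def Spec_search (n : Int) (f : Int) (i : Int) (out : Int) : Prop := out = search_alt n f i
instance (n : Int) (f : Int) (i : Int) (out : Int) : Decidable (Spec_search n f i out) := by unfold Spec_search; infer_instance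

-- ===== CLAIM (what is proved, stated in full; the proofs are below) =====
def Claim_equal_search : Prop := ∀ (n : Int) (f : Int) (i : Int), Dom_search n f i → Spec_search n f i (search n f i)

-- ===== LEMMAS AND PROOFS =====

-- ===== VERDICT (by name: the statement is the Claim_ definition above) =====
theorem search_agrees : ∀ (n : Int) (f : Int) (i : Int), search n f i = i + ((pyDigits n).count f : Int) := by
  intro n f i
  by_cases hn : n < 1
  · rw [search, pyDigits]; simp [hn, show ¬ n ≥ 1 by omega]
  · have hlt : (PySem.Int.floordiv n 10).toNat < n.toNat := by
      rw [PySem.Int.floordiv_eq_ediv_of_pos (by norm_num : (0:Int) < 10)]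
      omega
    have ih := search_agrees (PySem.Int.floordiv n 10) f
    rw [search, pyDigits]
    simp only [if_neg hn, if_pos (show n ≥ 1 by omega)]
    by_cases hf : PySem.Int.mod n 10 = f
    · simp only [ih, List.count_cons, hf, beq_self_eq_true, if_true]; push_cast; ring
    · have hemod : ¬ n % 10 = f := by
        rw [← PySem.Int.mod_eq_emod_of_pos (by norm_num : (0:Int) < 10)]; exact hf
      simp only [ih, List.count_cons]; simp [hemod]
termination_by n _ _ => n.toNat

theorem search_spec : Claim_equal_search := by
  intro n f i _
  unfold Spec_search search_alt
  exact search_agrees n f i
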